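-- pv_equiv track=rewrite | github.com/nageshwari76/DSA | 2598-shortest-distance-to-target-string-in-a-circular-array/shortest-distance-to-target-string-in-a-circular-array.py | closestTarget
-- ===== SOURCE A (Python) =====
-- from typing import List
--
-- def closestTarget(words: List[str], target: str, startIndex: int) -> int:
--     n = len(words)
--     res = float('inf')
--
--     for i in range(n):
--         if words[i] == target:
--             diff = abs(i - startIndex)
--             res = min(res, diff, n - diff)
--     return res if res != float('inf') else -1
-- ===== SOURCE B (Python) =====
-- def closestTarget(words, target, startIndex):
--     n = len(words)
--     first = prev = nxt = last = None
--     for i, w in enumerate(words):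
--         if w == target:
--             if first is None:
--                 first = i
--             if i <= startIndex:
--                 prev = i
--             if i >= startIndex and nxt is None:
--                 nxt = i
--             last = i
--     if first is None:
--         return -1
--     d0 = abs(first - startIndex)
--     best = min(d0, n - d0)
--     for j in (prev, nxt, last):
--         if j is not None:
--             d = abs(j - startIndex)
--             d = min(d, n - d)
--             if d < best:
--                 best = d
--     return best
-- ===== Notes on version B (the rewrite author's own statement) =====
-- stated objective: alternative
-- what changed: Instead of evaluating the wrap-around distance formula at every matching index and folding a running min, B makes one pass that only records four extremal match indices (first, last, nearest at-or-below startIndex, nearest at-or-above startIndex) and then takes the min of the formula over those candidates, which is exact because the distance formula is piecewise monotone in the index.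
import Mathlib
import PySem

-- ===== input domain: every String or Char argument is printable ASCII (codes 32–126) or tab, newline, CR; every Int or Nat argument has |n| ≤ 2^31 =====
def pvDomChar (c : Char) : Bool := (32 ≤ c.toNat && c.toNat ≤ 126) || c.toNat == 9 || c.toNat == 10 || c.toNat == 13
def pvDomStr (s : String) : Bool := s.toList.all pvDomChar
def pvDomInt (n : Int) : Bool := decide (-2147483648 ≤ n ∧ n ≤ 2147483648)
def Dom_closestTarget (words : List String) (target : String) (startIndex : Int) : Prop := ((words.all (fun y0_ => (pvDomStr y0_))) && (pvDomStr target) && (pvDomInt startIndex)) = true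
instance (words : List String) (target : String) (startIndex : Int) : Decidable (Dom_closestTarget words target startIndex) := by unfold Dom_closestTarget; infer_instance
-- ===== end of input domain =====

-- B replaces A's distance-evaluation at every matching index by a one-pass collection of four
-- extremal match indices (first, last, nearest below/above startIndex) followed by a constant-size
-- min — exact because A's distance formula is piecewise monotone in the index (alternative algorithm).

-- ===== PORT A =====
-- res = float('inf') is modelled as `none`; min(res, diff, n - diff) keeps Python's left-to-right association.
def closestTarget (words : List String) (target : String) (startIndex : Int) : Int :=
  let n : Int := (words.length : Int)
  let res : Option Int := (PySem.List.pyRange 0 n 1).foldl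
    (fun res i =>
      if PySem.List.pyGetD words i "" = target then
        let diff : Int := |i - startIndex|
        some (match res with
          | none => min diff (n - diff)
          | some r => min (min r diff) (n - diff))
      else res) none
  match res with
  | some r => r
  | none => -1

-- ===== PORT B =====
-- state (first, prev, nxt, last); None is modelled as `none`
def scanStep (target : String) (s : Int)
    (st : Option Int × Option Int × Option Int × Option Int) (p : Int × String) :
    Option Int × Option Int × Option Int × Option Int :=
  if p.2 = target then
    ((match st.1 with | none => some p.1 | some v => some v),
     (if p.1 ≤ s then some p.1 else st.2.1),
     (if s ≤ p.1 ∧ st.2.2.1 = none then some p.1 else st.2.2.1),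
     some p.1)
  else st

def closestTarget_alt (words : List String) (target : String) (startIndex : Int) : Int :=
  let n : Int := (words.length : Int)
  let st := (PySem.List.enumerate words).foldl (scanStep target startIndex) (none, none, none, none)
  match st.1 with
  | none => -1
  | some first =>
    let d0 : Int := |first - startIndex|
    let best : Int := min d0 (n - d0)
    [st.2.1, st.2.2.1, st.2.2.2].foldl
      (fun best j =>
        match j with
        | none => best
        | some j =>
          let d : Int := |j - startIndex|
          let d : Int := min d (n - d)
          if d < best then d else best) best

-- ===== PRECONDITION & SPEC =====
def Spec_closestTarget (words : List String) (target : String) (startIndex : Int) (out : Int) : Prop := out = closestTarget_alt words target startIndex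
instance (words : List String) (target : String) (startIndex : Int) (out : Int) : Decidable (Spec_closestTarget words target startIndex out) := by unfold Spec_closestTarget; infer_instance

-- ===== CLAIM (what is proved, stated in full; the proofs are below) =====
def Claim_equal_closestTarget : Prop := ∀ (words : List String) (target : String) (startIndex : Int), Dom_closestTarget words target startIndex → Spec_closestTarget words target startIndex (closestTarget words target startIndex)

-- ===== LEMMAS AND PROOFS =====

-- the match predicate both programs test, and A's candidate value at index i
def pMatch (words : List String) (target : String) (i : Int) : Bool :=
  PySem.List.pyGetD words i "" = target

def gval (N s i : Int) : Int := min |i - s| (N - |i - s|)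

-- the list of candidate values A's fold minimises
def valsOf (words : List String) (target : String) (N s : Int) (l : List Int) : List Int :=
  (l.filter (pMatch words target)).map (gval N s)

lemma valsOf_cons (words : List String) (target : String) (N s : Int) (i : Int) (l : List Int) :
    valsOf words target N s (i :: l) =
      if pMatch words target i then gval N s i :: valsOf words target N s l
      else valsOf words target N s l := by
  simp [valsOf, List.filter_cons]
  split <;> simp

-- A's fold step
def stepA (words : List String) (target : String) (N s : Int) (res : Option Int) (i : Int) : Option Int :=
  if PySem.List.pyGetD words i "" = target then
    some (match res with
      | none => min |i - s| (N - |i - s|)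
      | some r => min (min r |i - s|) (N - |i - s|))
  else res

lemma foldA_some (words : List String) (target : String) (N s : Int) :
    ∀ (l : List Int) (r : Int),
      l.foldl (stepA words target N s) (some r) =
        some ((valsOf words target N s l).foldl min r) := by
  intro l
  induction l with
  | nil => intro r; simp [valsOf]
  | cons i l ih =>
    intro r
    rw [List.foldl_cons, valsOf_cons]
    by_cases h : pMatch words target i
    · have h' : PySem.List.pyGetD words i "" = target := by
        simpa [pMatch] using h
      simp only [stepA, if_pos h', h, if_pos]
      rw [ih]
      congr 1
      simp [gval, min_assoc]
    · have h' : ¬ PySem.List.pyGetD words i "" = target := by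
        simpa [pMatch] using h
      simp [stepA, h', h]
      rw [ih]

lemma foldA_none (words : List String) (target : String) (N s : Int) :
    ∀ (l : List Int),
      l.foldl (stepA words target N s) none = (valsOf words target N s l).min? := by
  intro l
  induction l with
  | nil => simp [valsOf]
  | cons i l ih =>
    rw [List.foldl_cons, valsOf_cons]
    by_cases h : pMatch words target i
    · have h' : PySem.List.pyGetD words i "" = target := by
        simpa [pMatch] using h
      simp only [stepA, if_pos h', h, if_pos]
      rw [foldA_some]
      simp [List.min?, gval]
    · have h' : ¬ PySem.List.pyGetD words i "" = target := by
        simpa [pMatch] using h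
      simp [stepA, h', h, ih]

-- ===== B-side scan characterisation =====

-- the state B's first pass computes, as a function of the list of match indices seen so far
def stOf (s : Int) (ml : List Int) : Option Int × Option Int × Option Int × Option Int :=
  (ml.head?, (ml.filter (· ≤ s)).getLast?, (ml.filter (s ≤ ·)).head?, ml.getLast?)

lemma stOf_snoc (s : Int) (ml : List Int) (j : Int) :
    stOf s (ml ++ [j]) =
      ((match (stOf s ml).1 with | none => some j | some v => some v),
       (if j ≤ s then some j else (stOf s ml).2.1),
       (if s ≤ j ∧ (stOf s ml).2.2.1 = none then some j else (stOf s ml).2.2.1),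
       some j) := by
  unfold stOf
  refine Prod.ext ?_ (Prod.ext ?_ (Prod.ext ?_ ?_)) <;> simp only
  · rw [List.head?_append]
    cases ml.head? <;> simp
  · rw [List.filter_append]
    by_cases h : j ≤ s
    · simp [h]
    · simp [h]
  · rw [List.filter_append]
    by_cases h : s ≤ j
    · simp only [List.filter_cons, decide_eq_true_eq, if_pos h, List.filter_nil,
        List.head?_append]
      cases hh : (ml.filter (fun x => decide (s ≤ x))).head? <;> simp [h]
    · simp only [List.filter_cons, decide_eq_true_eq, if_neg h, List.filter_nil,
        List.append_nil]
      simp [h]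
  · simp

lemma scan_eq (words : List String) (target : String) (s : Int) :
    ∀ (l : List Int) (ml : List Int),
      l.foldl (fun st j => scanStep target s st (j, PySem.List.pyGetD words j "")) (stOf s ml) =
        stOf s (ml ++ l.filter (pMatch words target)) := by
  intro l
  induction l with
  | nil => intro ml; simp
  | cons j l ih =>
    intro ml
    rw [List.foldl_cons, List.filter_cons]
    by_cases h : pMatch words target j
    · have h' : PySem.List.pyGetD words j "" = target := by simpa [pMatch] using h
      have hstep :
          scanStep target s (stOf s ml) (j, PySem.List.pyGetD words j "") = stOf s (ml ++ [j]) := by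
        rw [stOf_snoc]
        unfold scanStep
        simp [h']
      rw [hstep, ih (ml ++ [j])]
      simp [h]
    · have h' : ¬ PySem.List.pyGetD words j "" = target := by simpa [pMatch] using h
      have hstep :
          scanStep target s (stOf s ml) (j, PySem.List.pyGetD words j "") = stOf s ml := by
        unfold scanStep
        simp [h']
      rw [hstep, ih ml]
      simp [h]

-- ===== order facts about the sorted match list =====

lemma sorted_head_le {l : List Int} {a x : Int}
    (h : (a :: l).Pairwise (· < ·)) (hx : x ∈ a :: l) : a ≤ x := by
  rcases List.mem_cons.mp hx with rfl | hx
  · exact le_refl x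
  · exact le_of_lt ((List.pairwise_cons.mp h).1 x hx)

lemma sorted_le_getLast {l : List Int} {x lv : Int}
    (h : l.Pairwise (· < ·)) (hlv : l.getLast? = some lv) (hx : x ∈ l) : x ≤ lv := by
  induction l with
  | nil => cases hx
  | cons a t ih =>
    cases t with
    | nil =>
      simp at hlv hx
      omega
    | cons b t =>
      rw [List.getLast?_cons_cons] at hlv
      rcases List.mem_cons.mp hx with rfl | hx
      · have hlv_mem : lv ∈ b :: t := List.mem_of_getLast? hlv
        exact le_of_lt ((List.pairwise_cons.mp h).1 lv hlv_mem)
      · exact ih (List.pairwise_cons.mp h).2 hlv hx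

-- the two monotonicity facts behind B: A's value at any match is dominated by its value
-- at an extremal candidate on the same side of startIndex
lemma gval_left (N s a p i : Int) (h1 : a ≤ i) (h2 : i ≤ p) (h3 : p ≤ s) :
    min (gval N s a) (gval N s p) ≤ gval N s i := by
  unfold gval
  rcases abs_cases (a - s) with ⟨ha1, ha2⟩ | ⟨ha1, ha2⟩ <;>
    rcases abs_cases (p - s) with ⟨hp1, hp2⟩ | ⟨hp1, hp2⟩ <;>
      rcases abs_cases (i - s) with ⟨hi1, hi2⟩ | ⟨hi1, hi2⟩ <;> omega

lemma gval_right (N s q b i : Int) (h1 : q ≤ i) (h2 : i ≤ b) (h3 : s ≤ q) :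
    min (gval N s q) (gval N s b) ≤ gval N s i := by
  unfold gval
  rcases abs_cases (q - s) with ⟨ha1, ha2⟩ | ⟨ha1, ha2⟩ <;>
    rcases abs_cases (b - s) with ⟨hp1, hp2⟩ | ⟨hp1, hp2⟩ <;>
      rcases abs_cases (i - s) with ⟨hi1, hi2⟩ | ⟨hi1, hi2⟩ <;> omega

-- ===== VERDICT (by name: the statement is the Claim_ definition above) =====
theorem closestTarget_spec : Claim_equal_closestTarget := by
  intro words target s _hdom
  unfold Spec_closestTarget
  set N : Int := (words.length : Int) with hN
  -- rewrite A
  have hA0 : closestTarget words target s =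
      match (PySem.List.pyRange 0 N 1).foldl (stepA words target N s) none with
      | some r => r
      | none => -1 := rfl
  set ml : List Int := (PySem.List.pyRange 0 N 1).filter (pMatch words target) with hml
  have hA : closestTarget words target s =
      match (ml.map (gval N s)).min? with
      | some r => r
      | none => -1 := by
    rw [hA0, foldA_none]; rfl
  -- rewrite B's scan
  have hscan : (PySem.List.enumerate words).foldl (scanStep target s) (none, none, none, none) =
      stOf s ml := by
    rw [PySem.List.enumerate_eq_map_pyRange words ""]
    rw [List.foldl_map]
    have h0 : (none, none, none, none) = stOf s ([] : List Int) := by simp [stOf]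
    have hlen : PySem.List.len words = N := by simp [hN]
    rw [hlen, h0, scan_eq words target s (PySem.List.pyRange 0 N 1) []]
    simp [hml]
  have hB0 : closestTarget_alt words target s =
      (match (stOf s ml).1 with
        | none => -1
        | some first =>
          [(stOf s ml).2.1, (stOf s ml).2.2.1, (stOf s ml).2.2.2].foldl
            (fun best j =>
              match j with
              | none => best
              | some j => if min |j - s| (N - |j - s|) < best then min |j - s| (N - |j - s|) else best)
            (min |first - s| (N - |first - s|))) := by
    unfold closestTarget_alt
    rw [hscan]
  rw [hA, hB0]
  have hsorted : ml.Pairwise (· < ·) :=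
    List.Pairwise.sublist List.filter_sublist (PySem.List.pairwise_lt_pyRange_one 0 N)
  clear_value ml
  clear hml hA hB0 hA0 hscan
  rcases ml with _ | ⟨m0, tl⟩
  · simp [stOf]
  · -- the head candidate
    have hfirst : (stOf s (m0 :: tl)).1 = some m0 := by simp [stOf]
    obtain ⟨lv, hlv⟩ : ∃ lv, (m0 :: tl).getLast? = some lv :=
      ⟨_, List.getLast?_eq_some_getLast (by simp)⟩
    have hlast : (stOf s (m0 :: tl)).2.2.2 = some lv := hlv
    -- A's min exists
    obtain ⟨m, hm⟩ : ∃ m, ((m0 :: tl).map (gval N s)).min? = some m := ⟨_, rfl⟩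
    obtain ⟨hm_mem, hm_le⟩ := List.min?_eq_some_iff.mp hm
    have hmem_gval : ∀ c ∈ m0 :: tl, m ≤ gval N s c := fun c hc =>
      hm_le _ (List.mem_map_of_mem hc)
    -- the witness index achieving m
    obtain ⟨i₀, hi₀_mem, hi₀⟩ := List.mem_map.mp hm_mem
    have hi₀_ge : m0 ≤ i₀ := sorted_head_le hsorted hi₀_mem
    have hi₀_le : i₀ ≤ lv := sorted_le_getLast hsorted hlv hi₀_mem
    have hm0_mem : m0 ∈ m0 :: tl := List.mem_cons_self
    have hlv_mem : lv ∈ m0 :: tl := List.mem_of_getLast? hlv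
    rw [hfirst, hlast, hm]
    -- case on which side of s the optimal index lies
    by_cases hside : i₀ ≤ s
    · -- prev exists and dominates together with m0
      have hfil : i₀ ∈ (m0 :: tl).filter (· ≤ s) := by
        rw [List.mem_filter]; exact ⟨hi₀_mem, by simpa using hside⟩
      obtain ⟨pv, hpv⟩ : ∃ pv, ((m0 :: tl).filter (· ≤ s)).getLast? = some pv := by
        cases hfe : (m0 :: tl).filter (· ≤ s) with
        | nil => rw [hfe] at hfil; cases hfil
        | cons x xs => exact ⟨_, List.getLast?_eq_some_getLast (by simp)⟩
      have hpv_filter : pv ∈ (m0 :: tl).filter (· ≤ s) := List.mem_of_getLast? hpv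
      have hpv_mem : pv ∈ m0 :: tl := (List.mem_filter.mp hpv_filter).1
      have hpv_le_s : pv ≤ s := by simpa using (List.mem_filter.mp hpv_filter).2
      have hsorted_f : ((m0 :: tl).filter (· ≤ s)).Pairwise (· < ·) :=
        List.Pairwise.sublist List.filter_sublist hsorted
      have hi₀_le_pv : i₀ ≤ pv := sorted_le_getLast hsorted_f hpv hfil
      have hkey : min (gval N s m0) (gval N s pv) ≤ gval N s i₀ :=
        gval_left N s m0 pv i₀ hi₀_ge hi₀_le_pv hpv_le_s
      have hprev : (stOf s (m0 :: tl)).2.1 = some pv := hpv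
      rw [hprev]
      have hm_m0 := hmem_gval m0 hm0_mem
      have hm_pv := hmem_gval pv hpv_mem
      have hm_lv := hmem_gval lv hlv_mem
      rw [hi₀] at hkey
      cases hnx : (stOf s (m0 :: tl)).2.2.1 with
      | none =>
        simp only [List.foldl]
        unfold gval at *
        set g0 : Int := min |m0 - s| (N - |m0 - s|) with hg0
        set g1 : Int := min |pv - s| (N - |pv - s|) with hg1
        set g2 : Int := min |lv - s| (N - |lv - s|) with hg2
        clear_value g0 g1 g2
        split_ifs <;> omega
      | some nx =>
        have hnx_mem : nx ∈ m0 :: tl := by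
          have hh : ((m0 :: tl).filter (s ≤ ·)).head? = some nx := hnx
          have : nx ∈ (m0 :: tl).filter (s ≤ ·) := List.mem_of_mem_head? (by rw [hh]; rfl)
          exact (List.mem_filter.mp this).1
        have hm_nx := hmem_gval nx hnx_mem
        simp only [List.foldl]
        unfold gval at *
        set g0 : Int := min |m0 - s| (N - |m0 - s|) with hg0
        set g1 : Int := min |pv - s| (N - |pv - s|) with hg1
        set g2 : Int := min |nx - s| (N - |nx - s|) with hg2
        set g3 : Int := min |lv - s| (N - |lv - s|) with hg3
        clear_value g0 g1 g2 g3
        split_ifs <;> omega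
    · -- nxt exists and dominates together with lv
      have hside' : s ≤ i₀ := by omega
      have hfil : i₀ ∈ (m0 :: tl).filter (s ≤ ·) := by
        rw [List.mem_filter]; exact ⟨hi₀_mem, by simpa using hside'⟩
      obtain ⟨nx, hnx⟩ : ∃ nx, ((m0 :: tl).filter (s ≤ ·)).head? = some nx := by
        cases hfe : (m0 :: tl).filter (s ≤ ·) with
        | nil => rw [hfe] at hfil; cases hfil
        | cons x xs => exact ⟨x, rfl⟩
      have hnx_filter : nx ∈ (m0 :: tl).filter (s ≤ ·) := List.mem_of_mem_head? (by rw [hnx]; rfl)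
      have hnx_mem : nx ∈ m0 :: tl := (List.mem_filter.mp hnx_filter).1
      have hs_le_nx : s ≤ nx := by simpa using (List.mem_filter.mp hnx_filter).2
      have hsorted_f : ((m0 :: tl).filter (s ≤ ·)).Pairwise (· < ·) :=
        List.Pairwise.sublist List.filter_sublist hsorted
      have hnx_le_i₀ : nx ≤ i₀ := by
        cases hfe : (m0 :: tl).filter (s ≤ ·) with
        | nil => rw [hfe] at hfil; cases hfil
        | cons x xs =>
          rw [hfe] at hnx hfil
          have hx : x = nx := by simpa using hnx
          subst hx
          exact sorted_head_le (hfe ▸ hsorted_f) hfil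
      have hkey : min (gval N s nx) (gval N s lv) ≤ gval N s i₀ :=
        gval_right N s nx lv i₀ hnx_le_i₀ hi₀_le hs_le_nx
      have hnxt : (stOf s (m0 :: tl)).2.2.1 = some nx := hnx
      rw [hnxt]
      have hm_m0 := hmem_gval m0 hm0_mem
      have hm_nx := hmem_gval nx hnx_mem
      have hm_lv := hmem_gval lv hlv_mem
      rw [hi₀] at hkey
      cases hpv : (stOf s (m0 :: tl)).2.1 with
      | none =>
        simp only [List.foldl]
        unfold gval at *
        set g0 : Int := min |m0 - s| (N - |m0 - s|) with hg0
        set g1 : Int := min |nx - s| (N - |nx - s|) with hg1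
        set g2 : Int := min |lv - s| (N - |lv - s|) with hg2
        clear_value g0 g1 g2
        split_ifs <;> omega
      | some pv =>
        have hpv_mem : pv ∈ m0 :: tl :=
          (List.mem_filter.mp (List.mem_of_getLast? hpv)).1
        have hm_pv := hmem_gval pv hpv_mem
        simp only [List.foldl]
        unfold gval at *
        set g0 : Int := min |m0 - s| (N - |m0 - s|) with hg0
        set g1 : Int := min |nx - s| (N - |nx - s|) with hg1
        set g2 : Int := min |pv - s| (N - |pv - s|) with hg2
        set g3 : Int := min |lv - s| (N - |lv - s|) with hg3
        clear_value g0 g1 g2 g3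
        split_ifs <;> omega
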